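-- pv_equiv track=rewrite | github.com/shenlei1020/Python_practice | stack_permutation.py | stack_permutation
-- ===== SOURCE A (Python) =====
-- def stack_permutation(olst, ilst):
--     temp = []
--     lenolst = len(olst)
--     while olst:
--         if (not temp) or olst[0] != temp[-1]:
--             if olst[0] in ilst:
--                 while olst[0] != ilst[-1]:
--                     temp.append(ilst.pop())
--                 del olst[0]
--                 ilst.pop()
--             else:
--                 return False
--         else:
--             del olst[0]
--             temp.pop()
--     return True
-- ===== SOURCE B (Python) =====
-- # Non-destructive single-pass simulation: one index pointer over ilst reversed; if the
-- # needed element is not ahead in the stream the scan exhausts it and we answer False.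
-- # Return value only: A destroys olst and ilst in place, B does not mutate its arguments.
-- def stack_permutation(olst, ilst):
--     stream = ilst[::-1]
--     n = len(stream)
--     i = 0
--     temp = []
--     for o in olst:
--         if temp and temp[-1] == o:
--             temp.pop()
--         else:
--             while i < n and stream[i] != o:
--                 temp.append(stream[i])
--                 i += 1
--             if i == n:
--                 return False
--             i += 1
--     return True
-- ===== Notes on version B (the rewrite author's own statement) =====
-- stated objective: simpler
-- what changed: Replaces A's destructive scan (list membership test, del olst[0] and pop-until-match from the end of ilst) with a non-destructive single pass over ilst reversed using one index pointer and no membership test: a failed search simply exhausts the stream and answers False; B does not mutate its arguments where A destroys both lists.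
import Mathlib
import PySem

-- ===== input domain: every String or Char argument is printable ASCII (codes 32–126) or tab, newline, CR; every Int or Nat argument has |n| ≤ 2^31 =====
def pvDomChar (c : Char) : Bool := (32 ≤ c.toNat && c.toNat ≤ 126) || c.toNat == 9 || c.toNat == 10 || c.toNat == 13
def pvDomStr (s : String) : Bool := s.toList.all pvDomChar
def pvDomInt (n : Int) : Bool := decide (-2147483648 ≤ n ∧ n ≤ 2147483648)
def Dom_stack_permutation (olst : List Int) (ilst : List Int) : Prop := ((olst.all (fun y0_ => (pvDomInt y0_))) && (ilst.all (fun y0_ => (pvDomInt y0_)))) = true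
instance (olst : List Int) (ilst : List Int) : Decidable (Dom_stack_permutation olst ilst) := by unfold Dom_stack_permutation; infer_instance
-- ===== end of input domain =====

-- B is a simpler non-destructive single-pass simulation: one index pointer over ilst
-- reversed, no membership test (a failed search just exhausts the stream and answers
-- False); equivalence is about the RETURN value only (A destroys olst and ilst in
-- place, B does not mutate its arguments).

-- ===== PORT A =====
-- inner `while olst[0] != ilst[-1]: temp.append(ilst.pop())` (ilst[-1] = getLast?, pop() = dropLast)
def pvInnerA (o : Int) (ilst temp : List Int) : List Int × List Int :=
  if hne : ilst = [] then (ilst, temp)   -- Python would raise here; unreachable (guarded by `o ∈ ilst`)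
  else
    let x := ilst.getLast hne            -- ilst[-1]
    if o ≠ x then pvInnerA o ilst.dropLast (temp ++ [x]) else (ilst, temp)
termination_by ilst.length
decreasing_by
  have := List.length_pos_of_ne_nil hne
  simp [List.length_dropLast]; omega

-- outer `while olst:` loop of A
def pvLoopA : List Int → List Int → List Int → Bool
  | [], _, _ => true
  | o :: olst, ilst, temp =>
    if temp = [] ∨ ¬ (temp.getLast? = some o) then
      if o ∈ ilst then
        let p := pvInnerA o ilst temp
        pvLoopA olst p.1.dropLast p.2     -- del olst[0]; ilst.pop()
      else false
    else
      pvLoopA olst ilst temp.dropLast     -- del olst[0]; temp.pop()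

def stack_permutation (olst : List Int) (ilst : List Int) : Bool :=
  let _lenolst := olst.length
  pvLoopA olst ilst []

-- ===== PORT B =====
-- inner `while i < n and stream[i] != o:` loop of B; the stream suffix from i is the list
def pvInnerB (o : Int) : List Int → List Int → List Int × List Int
  | [], temp => ([], temp)                                    -- i == n: stream exhausted
  | x :: s, temp => if x ≠ o then pvInnerB o s (temp ++ [x]) else (x :: s, temp)

-- `for o in olst:` loop of B
def pvLoopB : List Int → List Int → List Int → Bool
  | [], _, _ => true
  | o :: olst, stream, temp =>
    if temp ≠ [] ∧ temp.getLast? = some o then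
      pvLoopB olst stream temp.dropLast                        -- temp.pop()
    else
      let p := pvInnerB o stream temp
      match p.1 with
      | [] => false                                            -- if i == n: return False
      | _ :: s => pvLoopB olst s p.2                           -- i += 1

def stack_permutation_alt (olst : List Int) (ilst : List Int) : Bool :=
  pvLoopB olst ilst.reverse []                                 -- stream = ilst[::-1]

-- ===== PRECONDITION & SPEC =====
def Spec_stack_permutation (olst : List Int) (ilst : List Int) (out : Bool) : Prop := out = stack_permutation_alt olst ilst
instance (olst : List Int) (ilst : List Int) (out : Bool) : Decidable (Spec_stack_permutation olst ilst out) := by unfold Spec_stack_permutation; infer_instance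

-- ===== CLAIM =====
def Claim_equal_stack_permutation : Prop := ∀ (olst : List Int) (ilst : List Int), Dom_stack_permutation olst ilst → Spec_stack_permutation olst ilst (stack_permutation olst ilst)

-- ===== LEMMAS AND PROOFS =====
lemma pvInnerA_concat (o x : Int) (l temp : List Int) :
    pvInnerA o (l ++ [x]) temp =
      if o ≠ x then pvInnerA o l (temp ++ [x]) else (l ++ [x], temp) := by
  rw [pvInnerA]
  simp

-- when o is ahead in the stream, the two inner loops correspond:
-- B walks s from the front, A pops s.reverse from the back
lemma pvInner_corr (o : Int) :
    ∀ (s temp : List Int), o ∈ s →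
      ∃ s' t',
        pvInnerB o s temp = (o :: s', t') ∧
        pvInnerA o s.reverse temp = (s'.reverse ++ [o], t') := by
  intro s
  induction s with
  | nil => simp
  | cons x s ih =>
    intro temp hmem
    by_cases hxo : x = o
    · subst hxo
      refine ⟨s, temp, by simp [pvInnerB], ?_⟩
      rw [List.reverse_cons, pvInnerA_concat]; simp
    · have hmem' : o ∈ s := by
        rcases List.mem_cons.mp hmem with h | h
        · exact absurd h.symm hxo
        · exact h
      obtain ⟨s', t', h1, h2⟩ := ih (temp ++ [x]) hmem'
      refine ⟨s', t', ?_, ?_⟩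
      · simpa [pvInnerB, hxo] using h1
      · rw [List.reverse_cons, pvInnerA_concat]
        simpa [Ne.symm hxo] using h2

-- when o is not ahead in the stream, B's inner loop exhausts it
lemma pvInnerB_not_mem (o : Int) :
    ∀ (s temp : List Int), o ∉ s → (pvInnerB o s temp).1 = [] := by
  intro s
  induction s with
  | nil => simp [pvInnerB]
  | cons x s ih =>
    intro temp hmem
    have hxo : x ≠ o := fun h => hmem (by simp [h])
    have : o ∉ s := fun h => hmem (List.mem_cons_of_mem _ h)
    simpa [pvInnerB, hxo] using ih (temp ++ [x]) this

-- the two outer loops correspond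
lemma pvLoop_corr :
    ∀ (olst s temp : List Int),
      pvLoopA olst s.reverse temp = pvLoopB olst s temp := by
  intro olst
  induction olst with
  | nil => intros; simp [pvLoopA, pvLoopB]
  | cons o olst ih =>
    intro s temp
    by_cases hpop : temp ≠ [] ∧ temp.getLast? = some o
    · rw [pvLoopA, pvLoopB, if_neg (by push Not; exact hpop), if_pos hpop]
      exact ih s temp.dropLast
    · rw [pvLoopA, pvLoopB, if_pos (by tauto), if_neg hpop]
      by_cases hmem : o ∈ s
      · rw [if_pos (List.mem_reverse.mpr hmem)]
        obtain ⟨s', t', h1, h2⟩ := pvInner_corr o s temp hmem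
        rw [h1, h2]
        simp only [List.dropLast_concat]
        exact ih s' t'
      · rw [if_neg (fun h => hmem (List.mem_reverse.mp h))]
        simp [pvInnerB_not_mem o s temp hmem]

-- ===== VERDICT =====
theorem stack_permutation_spec : Claim_equal_stack_permutation := by
  intro olst ilst _
  unfold Spec_stack_permutation stack_permutation stack_permutation_alt
  have := pvLoop_corr olst ilst.reverse []
  simpa using this
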